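-- pv_equiv track=rewrite | github.com/PythonAlchemist/advent-of-code | day15.py | generate_clouds
-- ===== SOURCE A (Python) =====
-- def manhattan(p1, p2):
--     return abs(p1[0] - p2[0]) + abs(p1[1] - p2[1])
--
-- def generate_clouds(pairs, target):
--     target_set = set()
--     # convert pairs to clouds, construct column sets
--     for sensor, beacon in pairs:
--         sx, sy = sensor
--         bx, by = beacon
--
--         # calc distance
--         dist = manhattan(sensor, beacon)
--
--         d_target = abs(sy - target)
--         width = abs(dist - d_target)
--         mark = range(sx - width, sx + width + 1)
--
--         target_set.update(mark)
--
--     return target_set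
-- ===== SOURCE B (Python) =====
-- def generate_clouds(pairs, target):
--     out = []
--     cov = []  # covered intervals seen so far, as closed (lo, hi); always lo <= hi
--     for (sx, sy), (bx, by) in pairs:
--         width = abs(abs(sx - bx) + abs(sy - by) - abs(sy - target))
--         lo, hi = sx - width, sx + width
--         # gaps = the part of [lo, hi] not yet covered, as disjoint ascending pieces
--         gaps = [(lo, hi)]
--         for a, b in cov:
--             nxt = []
--             for g1, g2 in gaps:
--                 if g1 <= a - 1:
--                     nxt.append((g1, min(g2, a - 1)))
--                 if b + 1 <= g2:
--                     nxt.append((max(g1, b + 1), g2))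
--             gaps = nxt
--         for g1, g2 in gaps:
--             out.extend(range(g1, g2 + 1))
--         cov.append((lo, hi))
--     return set(out)
-- ===== Notes on version B (the rewrite author's own statement) =====
-- stated objective: faster
-- what changed: Replaces A's per-point set insertion over every covered x with interval arithmetic: each sensor's covered interval has the already-seen intervals subtracted from it and only the uncovered gap ranges are emitted, so overlapping regions are never re-scanned point by point.
import Mathlib
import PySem

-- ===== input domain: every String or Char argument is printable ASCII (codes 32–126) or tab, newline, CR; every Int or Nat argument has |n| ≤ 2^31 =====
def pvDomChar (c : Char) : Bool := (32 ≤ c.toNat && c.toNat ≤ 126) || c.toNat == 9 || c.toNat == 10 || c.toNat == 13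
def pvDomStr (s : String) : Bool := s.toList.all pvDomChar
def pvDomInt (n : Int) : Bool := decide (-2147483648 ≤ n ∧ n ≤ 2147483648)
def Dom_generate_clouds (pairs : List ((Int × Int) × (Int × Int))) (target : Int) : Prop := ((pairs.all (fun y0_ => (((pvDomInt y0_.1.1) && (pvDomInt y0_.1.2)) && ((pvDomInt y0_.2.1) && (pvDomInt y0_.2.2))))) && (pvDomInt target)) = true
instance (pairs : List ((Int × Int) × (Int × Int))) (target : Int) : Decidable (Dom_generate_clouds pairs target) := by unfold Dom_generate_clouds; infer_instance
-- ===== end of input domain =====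

-- B replaces A's per-point set marking with interval subtraction (emit only the not-yet-covered
-- gap ranges of each sensor's interval), a faster algorithm with the same returned set.

-- ===== PORT A =====
def manhattan (p1 p2 : Int × Int) : Int := |p1.1 - p2.1| + |p1.2 - p2.2|

def generate_clouds (pairs : List ((Int × Int) × (Int × Int))) (target : Int) : List Int :=
  pairs.foldl (fun target_set sb =>
    let sx := sb.1.1
    let sy := sb.1.2
    let dist := manhattan sb.1 sb.2
    let d_target := |sy - target|
    let width := |dist - d_target|
    PySem.Set.update target_set (PySem.List.pyRange (sx - width) (sx + width + 1) 1))
    PySem.Set.empty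

-- ===== PORT B =====
-- inner loop body of the interval subtraction in Source B
def pvSubStep (a b : Int) (nxt : List (Int × Int)) (g : Int × Int) : List (Int × Int) :=
  let nxt1 := if g.1 ≤ a - 1 then nxt ++ [(g.1, min g.2 (a - 1))] else nxt
  if b + 1 ≤ g.2 then nxt1 ++ [(max g.1 (b + 1), g.2)] else nxt1

def generate_clouds_alt (pairs : List ((Int × Int) × (Int × Int))) (target : Int) : List Int :=
  let st := pairs.foldl (fun st sb =>
    let sx := sb.1.1
    let sy := sb.1.2
    let bx := sb.2.1
    let my := sb.2.2
    let width := abs (abs (sx - bx) + abs (sy - my) - abs (sy - target))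
    let lo := sx - width
    let hi := sx + width
    let gaps := st.2.foldl (fun gaps ab => gaps.foldl (pvSubStep ab.1 ab.2) []) [(lo, hi)]
    let out := gaps.foldl (fun o g => o ++ PySem.List.pyRange g.1 (g.2 + 1) 1) st.1
    (out, st.2 ++ [(lo, hi)])) ([], [])
  PySem.Set.ofList st.1

-- ===== PRECONDITION & SPEC =====
def Spec_generate_clouds (pairs : List ((Int × Int) × (Int × Int))) (target : Int) (out : List Int) : Prop := out = generate_clouds_alt pairs target
instance (pairs : List ((Int × Int) × (Int × Int))) (target : Int) (out : List Int) : Decidable (Spec_generate_clouds pairs target out) := by unfold Spec_generate_clouds; infer_instance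

-- ===== CLAIM (what is proved, stated in full; the proofs are below) =====
def Claim_equal_generate_clouds : Prop := ∀ (pairs : List ((Int × Int) × (Int × Int))) (target : Int), Dom_generate_clouds pairs target → Spec_generate_clouds pairs target (generate_clouds pairs target)

-- ===== LEMMAS AND PROOFS =====

-- subpieces of one gap g after removing [a, b]
def pvSp (a b : Int) (g : Int × Int) : List (Int × Int) :=
  (if g.1 ≤ a - 1 then [(g.1, min g.2 (a - 1))] else []) ++
  (if b + 1 ≤ g.2 then [(max g.1 (b + 1), g.2)] else [])

-- x lies in the union of the closed intervals of l
def pvCovd (l : List (Int × Int)) (x : Int) : Prop := ∃ g ∈ l, g.1 ≤ x ∧ x ≤ g.2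

-- gap-list invariant: disjoint, ascending, nonempty pieces
def pvGInv (l : List (Int × Int)) : Prop :=
  l.Pairwise (fun p q => p.2 < q.1) ∧ ∀ g ∈ l, g.1 ≤ g.2

def pvNewpts (gaps : List (Int × Int)) : List Int :=
  gaps.flatMap (fun g => PySem.List.pyRange g.1 (g.2 + 1) 1)

theorem pvSubStep_eq (a b : Int) (nxt : List (Int × Int)) (g : Int × Int) :
    pvSubStep a b nxt g = nxt ++ pvSp a b g := by
  unfold pvSubStep pvSp; split_ifs <;> simp

theorem pvSub_eq_flatMap (a b : Int) (gaps acc : List (Int × Int)) :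
    gaps.foldl (pvSubStep a b) acc = acc ++ gaps.flatMap (pvSp a b) := by
  rw [PySem.List.foldl_congr_mem gaps (pvSubStep a b) (fun nxt g => nxt ++ pvSp a b g) acc
    (fun acc' g _ => pvSubStep_eq a b acc' g)]
  exact PySem.List.foldl_append_eq_flatMap _ _ _

theorem pvCovd_sp (a b x : Int) (g : Int × Int) :
    pvCovd (pvSp a b g) x ↔ (g.1 ≤ x ∧ x ≤ g.2) ∧ ¬(a ≤ x ∧ x ≤ b) := by
  simp only [pvCovd, pvSp]
  split_ifs <;> simp <;> omega

theorem pvCovd_flatMap_sp (a b x : Int) (gaps : List (Int × Int)) :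
    pvCovd (gaps.flatMap (pvSp a b)) x ↔ pvCovd gaps x ∧ ¬(a ≤ x ∧ x ≤ b) := by
  induction gaps with
  | nil => simp [pvCovd]
  | cons g rest ih =>
    have h1 : pvCovd ((g :: rest).flatMap (pvSp a b)) x ↔ pvCovd (pvSp a b g) x ∨ pvCovd (rest.flatMap (pvSp a b)) x := by
      simp [pvCovd, List.mem_append, or_and_right, exists_or]
    have h2 : pvCovd (g :: rest) x ↔ ((g.1 ≤ x ∧ x ≤ g.2) ∨ pvCovd rest x) := by
      simp [pvCovd]
    rw [h1, h2, pvCovd_sp, ih]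
    tauto

theorem pvSp_mem_bounds (a b : Int) (g g' : Int × Int) (hg : g.1 ≤ g.2)
    (h : g' ∈ pvSp a b g) : g.1 ≤ g'.1 ∧ g'.2 ≤ g.2 ∧ g'.1 ≤ g'.2 := by
  simp only [pvSp] at h
  split_ifs at h <;> simp at h <;> rcases h with h | h <;>
    (try subst h) <;> simp <;> omega

theorem pvGInv_flatMap_sp (a b : Int) (hab : a ≤ b) (gaps : List (Int × Int))
    (h : pvGInv gaps) : pvGInv (gaps.flatMap (pvSp a b)) := by
  obtain ⟨hpw, hne⟩ := h
  induction gaps with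
  | nil => exact ⟨List.Pairwise.nil, by simp⟩
  | cons g rest ih =>
    have hg : g.1 ≤ g.2 := hne g (by simp)
    have hrest := ih (List.pairwise_cons.mp hpw).2 (fun g' h' => hne g' (List.mem_cons_of_mem _ h'))
    constructor
    · rw [List.flatMap_cons, List.pairwise_append]
      refine ⟨?_, hrest.1, ?_⟩
      · -- pieces of one gap are ordered
        simp only [pvSp]
        split_ifs <;> simp <;> omega
      · intro p hp q hq
        have hpb := pvSp_mem_bounds a b g p hg hp
        rcases List.mem_flatMap.mp hq with ⟨g', hg', hq'⟩
        have hqb := pvSp_mem_bounds a b g' q (hne g' (List.mem_cons_of_mem _ hg')) hq'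
        have := (List.pairwise_cons.mp hpw).1 g' hg'
        omega
    · intro g' h'
      rcases List.mem_flatMap.mp h' with ⟨g0, hg0, hmem⟩
      rcases List.mem_cons.mp hg0 with rfl | hg0
      · exact (pvSp_mem_bounds a b g0 g' hg hmem).2.2
      · exact (pvSp_mem_bounds a b g0 g' (hne g0 (List.mem_cons_of_mem _ hg0)) hmem).2.2

theorem pvGapsFold_covd (cov : List (Int × Int)) (x : Int) :
    ∀ gaps, pvCovd (cov.foldl (fun gaps ab => gaps.foldl (pvSubStep ab.1 ab.2) []) gaps) x ↔
      pvCovd gaps x ∧ ∀ ab ∈ cov, ¬(ab.1 ≤ x ∧ x ≤ ab.2) := by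
  induction cov with
  | nil => simp
  | cons ab rest ih =>
    intro gaps
    rw [List.foldl_cons, ih, pvSub_eq_flatMap, List.nil_append, pvCovd_flatMap_sp]
    simp only [List.mem_cons]
    constructor
    · rintro ⟨⟨h1, h2⟩, h3⟩; exact ⟨h1, fun c hc => by rcases hc with rfl | hc; exact h2; exact h3 c hc⟩
    · rintro ⟨h1, h2⟩; exact ⟨⟨h1, h2 ab (Or.inl rfl)⟩, fun c hc => h2 c (Or.inr hc)⟩

theorem pvGapsFold_inv (cov : List (Int × Int)) (hcov : ∀ g ∈ cov, g.1 ≤ g.2) :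
    ∀ gaps, pvGInv gaps →
      pvGInv (cov.foldl (fun gaps ab => gaps.foldl (pvSubStep ab.1 ab.2) []) gaps) := by
  induction cov with
  | nil => intro gaps h; exact h
  | cons ab rest ih =>
    intro gaps h
    rw [List.foldl_cons]
    refine ih (fun g hg => hcov g (List.mem_cons_of_mem _ hg)) _ ?_
    rw [pvSub_eq_flatMap, List.nil_append]
    exact pvGInv_flatMap_sp ab.1 ab.2 (hcov ab (by simp)) gaps h

theorem pvMem_newpts (gaps : List (Int × Int)) (x : Int) :
    x ∈ pvNewpts gaps ↔ pvCovd gaps x := by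
  simp only [pvNewpts, List.mem_flatMap, pvCovd, PySem.List.mem_pyRange_one]
  constructor <;> rintro ⟨g, hg, h⟩ <;> exact ⟨g, hg, by omega⟩

theorem pvNewpts_pairwise (gaps : List (Int × Int)) (h : pvGInv gaps) :
    (pvNewpts gaps).Pairwise (· < ·) := by
  obtain ⟨hpw, hne⟩ := h
  induction gaps with
  | nil => exact List.Pairwise.nil
  | cons g rest ih =>
    rw [pvNewpts, List.flatMap_cons, List.pairwise_append]
    refine ⟨PySem.List.pairwise_lt_pyRange_one _ _,
      ih (List.pairwise_cons.mp hpw).2 (fun g' h' => hne g' (List.mem_cons_of_mem _ h')), ?_⟩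
    intro p hp q hq
    have hp' := (PySem.List.mem_pyRange_one).mp hp
    have hq' : pvCovd rest q := (pvMem_newpts rest q).mp hq
    obtain ⟨g', hg', hq1, _⟩ := hq'
    have := (List.pairwise_cons.mp hpw).1 g' hg'
    omega

theorem pvSorted_ext (l1 l2 : List Int) (h1 : l1.Pairwise (· < ·)) (h2 : l2.Pairwise (· < ·))
    (h : ∀ x, x ∈ l1 ↔ x ∈ l2) : l1 = l2 := by
  have n1 : l1.Nodup := h1.imp (fun h => ne_of_lt h)
  have n2 : l2.Nodup := h2.imp (fun h => ne_of_lt h)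
  exact ((List.perm_ext_iff_of_nodup n1 n2).mpr h).eq_of_pairwise
    (fun a b _ _ hab hba => absurd hba (not_lt.mpr hab.le)) h1 h2

-- one sensor step: B's gap emission equals A's set update
theorem pvStep (ts : List Int) (cov : List (Int × Int)) (lo hi : Int) (hlh : lo ≤ hi)
    (hmem : ∀ x, x ∈ ts ↔ pvCovd cov x) (hcov : ∀ g ∈ cov, g.1 ≤ g.2) :
    (cov.foldl (fun gaps ab => gaps.foldl (pvSubStep ab.1 ab.2) []) [(lo, hi)]).foldl
        (fun o g => o ++ PySem.List.pyRange g.1 (g.2 + 1) 1) ts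
      = PySem.Set.update ts (PySem.List.pyRange lo (hi + 1) 1) := by
  rw [PySem.List.foldl_append_eq_flatMap, PySem.Set.update_eq_append_filter,
    PySem.Set.ofList_eq_self_of_nodup _ (PySem.List.nodup_pyRange_one lo (hi + 1))]
  congr 1
  have hinv : pvGInv (cov.foldl (fun gaps ab => gaps.foldl (pvSubStep ab.1 ab.2) []) [(lo, hi)]) :=
    pvGapsFold_inv cov hcov [(lo, hi)] ⟨by simp, by simp [hlh]⟩
  apply pvSorted_ext
  · exact pvNewpts_pairwise _ hinv
  · exact List.Pairwise.sublist List.filter_sublist (PySem.List.pairwise_lt_pyRange_one _ _)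
  · intro x
    rw [show (cov.foldl (fun gaps ab => gaps.foldl (pvSubStep ab.1 ab.2) []) [(lo, hi)]).flatMap
          (fun g => PySem.List.pyRange g.1 (g.2 + 1) 1) = pvNewpts _ from rfl,
      pvMem_newpts, pvGapsFold_covd]
    simp only [List.mem_filter, PySem.List.mem_pyRange_one, Bool.not_eq_eq_eq_not, Bool.not_true,
      PySem.Set.contains_eq_listContains, pvCovd]
    constructor
    · rintro ⟨⟨g, hg, hx1, hx2⟩, hnone⟩
      rcases List.mem_singleton.mp hg with rfl
      refine ⟨⟨by simpa using hx1, by dsimp at hx2; omega⟩, ?_⟩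
      simp only [List.contains_eq_mem, decide_eq_false_iff_not]
      rw [hmem]
      rintro ⟨ab, hab, hab1, hab2⟩
      exact hnone ab hab ⟨hab1, hab2⟩
    · rintro ⟨⟨hx1, hx2⟩, hni⟩
      simp only [List.contains_eq_mem, decide_eq_false_iff_not] at hni
      rw [hmem] at hni
      refine ⟨⟨(lo, hi), by simp, hx1, by omega⟩, ?_⟩
      intro ab hab habx
      exact hni ⟨ab, hab, habx.1, habx.2⟩

-- the main loop invariant
theorem pvLoop (pairs : List ((Int × Int) × (Int × Int))) (target : Int) :
    ∀ (ts out : List Int) (cov : List (Int × Int)),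
      ts = out → ts.Nodup → (∀ x, x ∈ ts ↔ pvCovd cov x) → (∀ g ∈ cov, g.1 ≤ g.2) →
      (let tsf := pairs.foldl (fun target_set sb =>
          let sx := sb.1.1
          let sy := sb.1.2
          let dist := manhattan sb.1 sb.2
          let d_target := |sy - target|
          let width := |dist - d_target|
          PySem.Set.update target_set (PySem.List.pyRange (sx - width) (sx + width + 1) 1)) ts
       let stf := pairs.foldl (fun st sb =>
          let sx := sb.1.1
          let sy := sb.1.2
          let bx := sb.2.1
          let my := sb.2.2
          let width := abs (abs (sx - bx) + abs (sy - my) - abs (sy - target))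
          let lo := sx - width
          let hi := sx + width
          let gaps := st.2.foldl (fun gaps ab => gaps.foldl (pvSubStep ab.1 ab.2) []) [(lo, hi)]
          let out := gaps.foldl (fun o g => o ++ PySem.List.pyRange g.1 (g.2 + 1) 1) st.1
          (out, st.2 ++ [(lo, hi)])) (out, cov)
       tsf = stf.1 ∧ tsf.Nodup ∧ (∀ x, x ∈ tsf ↔ pvCovd stf.2 x) ∧ (∀ g ∈ stf.2, g.1 ≤ g.2)) := by
  induction pairs with
  | nil =>
    intro ts out cov h1 h2 h3 h4
    subst h1
    exact ⟨rfl, h2, h3, h4⟩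
  | cons sb rest ih =>
    intro ts out cov h1 h2 h3 h4
    subst h1
    simp only [List.foldl_cons, manhattan]
    have hw : (0:Int) ≤ abs (abs (sb.1.1 - sb.2.1) + abs (sb.1.2 - sb.2.2) - abs (sb.1.2 - target)) := abs_nonneg _
    refine ih _ _ _ ?_ ?_ ?_ ?_
    · exact (pvStep ts cov _ _ (by omega) h3 h4).symm
    · exact PySem.Set.nodup_update _ _ h2
    · intro x
      rw [PySem.Set.mem_update, h3]
      simp only [pvCovd, List.mem_append, List.mem_singleton, PySem.List.mem_pyRange_one]
      constructor
      · rintro (⟨g, hg, hx⟩ | hx)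
        · exact ⟨g, Or.inl hg, hx⟩
        · exact ⟨_, Or.inr rfl, by dsimp; omega⟩
      · rintro ⟨g, hg | rfl, hx⟩
        · exact Or.inl ⟨g, hg, hx⟩
        · dsimp at hx; exact Or.inr (by omega)
    · intro g hg
      rcases List.mem_append.mp hg with h | h
      · exact h4 g h
      · rcases List.mem_singleton.mp h with rfl
        dsimp; omega

-- ===== VERDICT (by name: the statement is the Claim_ definition above) =====
theorem generate_clouds_spec : Claim_equal_generate_clouds := by
  intro pairs target _
  unfold Spec_generate_clouds generate_clouds generate_clouds_alt
  simp only
  have h := pvLoop pairs target [] [] [] rfl List.nodup_nil (by simp [pvCovd]) (by simp)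
  simp only at h
  obtain ⟨heq, hnd, -, -⟩ := h
  exact heq.trans (PySem.Set.ofList_eq_self_of_nodup _ (heq ▸ hnd)).symm
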